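-- pv_equiv track=rewrite | github.com/Jazeye/hash-revel | hashrev/hashrev.py | identify_hash
-- ===== SOURCE A (Python) =====
-- def identify_hash(hash_value):
--     hash_type = "Unknown"
--
--     if len(hash_value) == 32 and all(c in '0123456789abcdef' for c in hash_value):
--         hash_type = "MD5"
--     elif len(hash_value) == 40 and all(c in '0123456789abcdef' for c in hash_value):
--         hash_type = "SHA1"
--     elif len(hash_value) == 64 and all(c in '0123456789abcdef' for c in hash_value):
--         hash_type = "SHA256"
--     elif len(hash_value) == 128 and all(c in '0123456789abcdef' for c in hash_value):
--         hash_type = "SHA512"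
--     elif len(hash_value) == 32 and len(hash_value) == 64:
--         hash_type = "NTLM"
--     elif len(hash_value) == 32 and len(hash_value) == 96:
--         hash_type = "LM"
--     elif len(hash_value) == 60 and hash_value.startswith("$2"):
--         hash_type = "bcrypt"
--     elif len(hash_value) == 60 and hash_value.startswith("$s2"):
--         hash_type = "scrypt"
--     elif len(hash_value) == 60 and hash_value.startswith("$pbkdf2-sha1$"):
--         hash_type = "PBKDF2"
--     elif len(hash_value) == 60 and hash_value.startswith("$argon2"):
--         hash_type = "Argon2"
--     elif len(hash_value) == 64 and all(c in '0123456789abcdef' for c in hash_value):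
--         hash_type = "SHA3-256"
--     elif len(hash_value) == 128 and all(c in '0123456789abcdef' for c in hash_value):
--         hash_type = "SHA3-512"
--     elif len(hash_value) == 96 and all(c in '0123456789abcdef' for c in hash_value):
--         hash_type = "SHA3-384"
--     elif len(hash_value) == 40 and hash_value.startswith("sha1$"):
--         hash_type = "Django SHA1"
--     elif len(hash_value) == 64 and hash_value.startswith("sha256$"):
--         hash_type = "Django SHA256"
--     elif len(hash_value) == 128 and hash_value.startswith("sha512$"):
--         hash_type = "Django SHA512"
--     elif len(hash_value) == 55 and hash_value.startswith("$S$"):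
--         hash_type = "Drupal SHA512"
--
--     return hash_type
-- ===== SOURCE B (Python) =====
-- _HEXDIGITS = '0123456789abcdef'
--
-- def _is_hex(s):
--     return all(c in _HEXDIGITS for c in s)
--
-- # length-keyed rule table; in each bucket the first matching rule wins,
-- # preserving A's intra-length order.  Rules are ('hex', label) or ('pre', prefix, label).
-- _RULES = {
--     32: [('hex', 'MD5')],
--     40: [('hex', 'SHA1'), ('pre', 'sha1$', 'Django SHA1')],
--     64: [('hex', 'SHA256'), ('pre', 'sha256$', 'Django SHA256')],
--     128: [('hex', 'SHA512'), ('pre', 'sha512$', 'Django SHA512')],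
--     96: [('hex', 'SHA3-384')],
--     60: [('pre', '$2', 'bcrypt'), ('pre', '$s2', 'scrypt'),
--          ('pre', '$pbkdf2-sha1$', 'PBKDF2'), ('pre', '$argon2', 'Argon2')],
--     55: [('pre', '$S$', 'Drupal SHA512')],
-- }
--
-- def identify_hash(hash_value):
--     for rule in _RULES.get(len(hash_value), []):
--         if rule[0] == 'hex':
--             if _is_hex(hash_value):
--                 return rule[1]
--         else:
--             if hash_value.startswith(rule[1]):
--                 return rule[2]
--     return "Unknown"
-- ===== Notes on version B (the rewrite author's own statement) =====
-- stated objective: idiomatic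
-- what changed: Replaces the flat 17-branch if/elif chain (which re-tests len() in every branch and contains unreachable NTLM/LM/SHA3-256/SHA3-512 branches) by a length-keyed table of (predicate, label) rules looked up once, then scanned first-match within the bucket, preserving A's intra-length order.
import Mathlib
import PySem

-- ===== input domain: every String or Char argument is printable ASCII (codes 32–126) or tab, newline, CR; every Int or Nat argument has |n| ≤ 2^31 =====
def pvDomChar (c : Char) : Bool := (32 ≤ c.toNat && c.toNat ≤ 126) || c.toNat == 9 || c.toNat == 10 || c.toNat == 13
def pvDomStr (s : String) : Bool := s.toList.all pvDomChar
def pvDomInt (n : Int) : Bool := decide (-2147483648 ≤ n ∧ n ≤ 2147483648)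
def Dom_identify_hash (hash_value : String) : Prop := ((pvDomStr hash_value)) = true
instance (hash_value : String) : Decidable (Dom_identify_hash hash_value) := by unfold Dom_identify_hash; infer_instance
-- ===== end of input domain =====

-- B replaces A's flat 17-branch if/elif chain by a length-keyed rule table with a
-- short first-match scan of the matching bucket (objective: idiomatic/data-structure).

-- ===== PORT A =====
-- 'all(c in "0123456789abcdef" for c in hash_value)' ported as List.all over the
-- string's chars with char membership in the hex-digit chars (exact: each iterated
-- Python char is a length-1 string, and 'c in s' for it is char membership).
def identify_hash (hash_value : String) : String :=
  if PySem.Str.len hash_value = 32 ∧ (hash_value.toList.all fun c => "0123456789abcdef".toList.contains c) then "MD5"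
  else if PySem.Str.len hash_value = 40 ∧ (hash_value.toList.all fun c => "0123456789abcdef".toList.contains c) then "SHA1"
  else if PySem.Str.len hash_value = 64 ∧ (hash_value.toList.all fun c => "0123456789abcdef".toList.contains c) then "SHA256"
  else if PySem.Str.len hash_value = 128 ∧ (hash_value.toList.all fun c => "0123456789abcdef".toList.contains c) then "SHA512"
  else if PySem.Str.len hash_value = 32 ∧ PySem.Str.len hash_value = 64 then "NTLM"
  else if PySem.Str.len hash_value = 32 ∧ PySem.Str.len hash_value = 96 then "LM"
  else if PySem.Str.len hash_value = 60 ∧ PySem.Str.startswith hash_value "$2" then "bcrypt"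
  else if PySem.Str.len hash_value = 60 ∧ PySem.Str.startswith hash_value "$s2" then "scrypt"
  else if PySem.Str.len hash_value = 60 ∧ PySem.Str.startswith hash_value "$pbkdf2-sha1$" then "PBKDF2"
  else if PySem.Str.len hash_value = 60 ∧ PySem.Str.startswith hash_value "$argon2" then "Argon2"
  else if PySem.Str.len hash_value = 64 ∧ (hash_value.toList.all fun c => "0123456789abcdef".toList.contains c) then "SHA3-256"
  else if PySem.Str.len hash_value = 128 ∧ (hash_value.toList.all fun c => "0123456789abcdef".toList.contains c) then "SHA3-512"
  else if PySem.Str.len hash_value = 96 ∧ (hash_value.toList.all fun c => "0123456789abcdef".toList.contains c) then "SHA3-384"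
  else if PySem.Str.len hash_value = 40 ∧ PySem.Str.startswith hash_value "sha1$" then "Django SHA1"
  else if PySem.Str.len hash_value = 64 ∧ PySem.Str.startswith hash_value "sha256$" then "Django SHA256"
  else if PySem.Str.len hash_value = 128 ∧ PySem.Str.startswith hash_value "sha512$" then "Django SHA512"
  else if PySem.Str.len hash_value = 55 ∧ PySem.Str.startswith hash_value "$S$" then "Drupal SHA512"
  else "Unknown"

-- ===== PORT B =====
-- a rule: either 'the string is all hex digits' or 'the string starts with this prefix'
inductive HRule
  | hex : String → HRule
  | pre : String → String → HRule
deriving DecidableEq, Repr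

-- Source B's _is_hex helper
def hrIsHex (s : String) : Bool := s.toList.all fun c => "0123456789abcdef".toList.contains c

-- Source B's _RULES dict, ported as an association list (insertion order)
def hrTable : List (Int × List HRule) :=
  [ (32, [.hex "MD5"]),
    (40, [.hex "SHA1", .pre "sha1$" "Django SHA1"]),
    (64, [.hex "SHA256", .pre "sha256$" "Django SHA256"]),
    (128, [.hex "SHA512", .pre "sha512$" "Django SHA512"]),
    (96, [.hex "SHA3-384"]),
    (60, [.pre "$2" "bcrypt", .pre "$s2" "scrypt",
          .pre "$pbkdf2-sha1$" "PBKDF2", .pre "$argon2" "Argon2"]),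
    (55, [.pre "$S$" "Drupal SHA512"]) ]

-- dict.get(len, []) : first-match lookup in the association list
def hrLookup : List (Int × List HRule) → Int → List HRule
  | [], _ => []
  | (k, v) :: rest, n => if n = k then v else hrLookup rest n

-- the in-bucket loop: first rule whose predicate holds wins
def hrScan (s : String) : List HRule → String
  | [] => "Unknown"
  | .hex label :: rs => if hrIsHex s then label else hrScan s rs
  | .pre p label :: rs => if PySem.Str.startswith s p then label else hrScan s rs

def identify_hash_alt (hash_value : String) : String :=
  hrScan hash_value (hrLookup hrTable (PySem.Str.len hash_value))

-- ===== PRECONDITION & SPEC =====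
def Spec_identify_hash (hash_value : String) (out : String) : Prop := out = identify_hash_alt hash_value
instance (hash_value : String) (out : String) : Decidable (Spec_identify_hash hash_value out) := by unfold Spec_identify_hash; infer_instance

-- ===== CLAIM (what is proved, stated in full; the proofs are below) =====
def Claim_equal_identify_hash : Prop := ∀ (hash_value : String), Dom_identify_hash hash_value → Spec_identify_hash hash_value (identify_hash hash_value)

-- ===== LEMMAS AND PROOFS =====

-- ===== VERDICT (by name: the statement is the Claim_ definition above) =====
set_option maxRecDepth 4000 in
set_option maxHeartbeats 1000000 in
theorem identify_hash_spec : Claim_equal_identify_hash := by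
  intro s _
  unfold Spec_identify_hash identify_hash identify_hash_alt
  by_cases h32 : PySem.Str.len s = 32
  · simp only [h32, hrTable, hrLookup]
    simp only [Int.reduceEq, false_and, true_and, and_false, and_true, if_false, if_true, hrScan, hrIsHex]
    try (split_ifs <;> first | rfl | contradiction)
  by_cases h40 : PySem.Str.len s = 40
  · simp only [h40, hrTable, hrLookup]
    simp only [Int.reduceEq, false_and, true_and, and_false, and_true, if_false, if_true, hrScan, hrIsHex]
    try (split_ifs <;> first | rfl | contradiction)
  by_cases h64 : PySem.Str.len s = 64
  · simp only [h64, hrTable, hrLookup]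
    simp only [Int.reduceEq, false_and, true_and, and_false, and_true, if_false, if_true, hrScan, hrIsHex]
    try (split_ifs <;> first | rfl | contradiction)
  by_cases h128 : PySem.Str.len s = 128
  · simp only [h128, hrTable, hrLookup]
    simp only [Int.reduceEq, false_and, true_and, and_false, and_true, if_false, if_true, hrScan, hrIsHex]
    try (split_ifs <;> first | rfl | contradiction)
  by_cases h96 : PySem.Str.len s = 96
  · simp only [h96, hrTable, hrLookup]
    simp only [Int.reduceEq, false_and, true_and, and_false, and_true, if_false, if_true, hrScan, hrIsHex]
    try (split_ifs <;> first | rfl | contradiction)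
  by_cases h60 : PySem.Str.len s = 60
  · simp only [h60, hrTable, hrLookup]
    simp only [Int.reduceEq, false_and, true_and, and_false, and_true, if_false, if_true, hrScan, hrIsHex]
    try (split_ifs <;> first | rfl | contradiction)
  by_cases h55 : PySem.Str.len s = 55
  · simp only [h55, hrTable, hrLookup]
    simp only [Int.reduceEq, false_and, true_and, and_false, and_true, if_false, if_true, hrScan, hrIsHex]
    try (split_ifs <;> first | rfl | contradiction)
  simp only [hrTable, hrLookup]
  rw [if_neg h32, if_neg h40, if_neg h64, if_neg h128, if_neg h96, if_neg h60, if_neg h55]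
  simp only [hrScan]
  rw [if_neg (fun h => h32 h.1), if_neg (fun h => h40 h.1), if_neg (fun h => h64 h.1),
      if_neg (fun h => h128 h.1), if_neg (fun h => h32 h.1), if_neg (fun h => h32 h.1),
      if_neg (fun h => h60 h.1), if_neg (fun h => h60 h.1), if_neg (fun h => h60 h.1),
      if_neg (fun h => h60 h.1), if_neg (fun h => h64 h.1), if_neg (fun h => h128 h.1),
      if_neg (fun h => h96 h.1), if_neg (fun h => h40 h.1), if_neg (fun h => h64 h.1),
      if_neg (fun h => h128 h.1), if_neg (fun h => h55 h.1)]
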